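-- pv_equiv track=rewrite | github.com/TylerMorley/advent-of-code | 2024/day07/day07.py | operCombos
-- ===== SOURCE A (Python) =====
-- def operCombos(num_numbers, use_concat=False):
--     combos = []
--     for layer in range(num_numbers-1):
--         new_combos = []
--         if len(combos) == 0:
--             combos = [['+'], ['*']]
--             if use_concat:
--                 combos.append(['||'])
--             continue
--         for combo in combos:
--             new_combos.append(combo + ['+'])
--             new_combos.append(combo + ['*'])
--             if use_concat:
--                 new_combos.append(combo + ['||'])
--         combos = new_combos
--
--     return combos
-- ===== SOURCE B (Python) =====
-- def operCombos(num_numbers, use_concat=False):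
--     ops = ['+', '*', '||'] if use_concat else ['+', '*']
--     if num_numbers - 1 <= 0:
--         return []
--
--     def rec(k):
--         if k == 0:
--             return [[]]
--         return [[op] + rest for op in ops for rest in rec(k - 1)]
--
--     return rec(num_numbers - 1)
-- ===== Notes on version B (the rewrite author's own statement) =====
-- stated objective: idiomatic
-- what changed: Replaces the imperative layer loop with its special-cased first iteration and append-at-the-end growth by an explicit ops list, an early return for the degenerate case, and a recursion on the combination length that prepends the outermost operator.
import Mathlib
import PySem

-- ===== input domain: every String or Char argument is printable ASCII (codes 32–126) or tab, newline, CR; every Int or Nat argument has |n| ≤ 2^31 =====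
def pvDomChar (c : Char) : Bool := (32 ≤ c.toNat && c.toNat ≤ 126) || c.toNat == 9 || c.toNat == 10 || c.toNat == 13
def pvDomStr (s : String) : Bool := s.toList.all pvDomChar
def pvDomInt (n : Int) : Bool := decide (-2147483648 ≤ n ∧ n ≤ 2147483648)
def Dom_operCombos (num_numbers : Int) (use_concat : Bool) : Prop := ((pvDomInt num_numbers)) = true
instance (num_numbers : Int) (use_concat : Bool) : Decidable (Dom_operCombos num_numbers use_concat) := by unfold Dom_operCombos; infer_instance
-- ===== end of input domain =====

-- B replaces A's imperative layer loop (special-cased first iteration, append-at-the-end growth)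
-- by an explicit ops list and a recursion on the combination length; same values, idiomatic decomposition.

-- ===== PORT A =====
def operCombos (num_numbers : Int) (use_concat : Bool) : List (List String) :=
  (PySem.List.pyRange 0 (num_numbers - 1) 1).foldl (fun combos _layer =>
    if combos.length == 0 then
      (if use_concat then [["+"], ["*"], ["||"]] else [["+"], ["*"]])
    else
      combos.foldl (fun new_combos combo =>
        if use_concat then
          new_combos ++ [combo ++ ["+"]] ++ [combo ++ ["*"]] ++ [combo ++ ["||"]]
        else
          new_combos ++ [combo ++ ["+"]] ++ [combo ++ ["*"]]) []) []

-- ===== PORT B =====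
def altOps (use_concat : Bool) : List String :=
  if use_concat then ["+", "*", "||"] else ["+", "*"]

def altRec (ops : List String) : Nat → List (List String)
  | 0 => [[]]
  | k + 1 => ops.flatMap (fun op => (altRec ops k).map (fun rest => op :: rest))

def operCombos_alt (num_numbers : Int) (use_concat : Bool) : List (List String) :=
  if num_numbers - 1 ≤ 0 then [] else altRec (altOps use_concat) (num_numbers - 1).toNat

-- ===== PRECONDITION & SPEC =====
def Spec_operCombos (num_numbers : Int) (use_concat : Bool) (out : List (List String)) : Prop := out = operCombos_alt num_numbers use_concat
instance (num_numbers : Int) (use_concat : Bool) (out : List (List String)) : Decidable (Spec_operCombos num_numbers use_concat out) := by unfold Spec_operCombos; infer_instance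

-- ===== CLAIM (what is proved, stated in full; the proofs are below) =====
def Claim_equal_operCombos : Prop := ∀ (num_numbers : Int) (use_concat : Bool), Dom_operCombos num_numbers use_concat → Spec_operCombos num_numbers use_concat (operCombos num_numbers use_concat)

-- ===== LEMMAS AND PROOFS =====

-- One layer of A's inner loop is a flatMap over the operator list.
theorem innerA (u : Bool) (combos acc : List (List String)) :
    combos.foldl (fun new_combos combo =>
        if u then
          new_combos ++ [combo ++ ["+"]] ++ [combo ++ ["*"]] ++ [combo ++ ["||"]]
        else
          new_combos ++ [combo ++ ["+"]] ++ [combo ++ ["*"]]) acc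
      = acc ++ combos.flatMap (fun c => (altOps u).map (fun o => c ++ [o])) := by
  induction combos generalizing acc with
  | nil => simp
  | cons c t ih => cases u <;> simp [ih, altOps, List.flatMap, List.append_assoc]

theorem altRec_ne_nil (u : Bool) (k : Nat) : altRec (altOps u) k ≠ [] := by
  induction k with
  | zero => simp [altRec]
  | succ k ih =>
    obtain ⟨r, hr⟩ := List.exists_mem_of_ne_nil _ ih
    intro h
    have hm : ("+" :: r) ∈ altRec (altOps u) (k + 1) := by
      simp only [altRec, List.mem_flatMap, List.mem_map]
      exact ⟨"+", by cases u <;> simp [altOps], r, hr, rfl⟩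
    rw [h] at hm
    exact (List.not_mem_nil) hm

-- Appending one operator at the end of every combination extends the length by one.
theorem extend_altRec (u : Bool) (k : Nat) :
    (altRec (altOps u) k).flatMap (fun c => (altOps u).map (fun o => c ++ [o]))
      = altRec (altOps u) (k + 1) := by
  induction k with
  | zero => cases u <;> simp [altRec, altOps]
  | succ k ih =>
    conv_lhs => rw [altRec, List.flatMap_assoc]
    rw [show altRec (altOps u) (k + 1 + 1)
        = (altOps u).flatMap (fun op => (altRec (altOps u) (k + 1)).map (fun rest => op :: rest))
      from rfl, ← ih]
    simp [List.flatMap_map, List.map_flatMap, Function.comp_def]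

-- A's loop over n ≥ 1 layers produces altRec n.
theorem loopA (u : Bool) (n : Nat) (hn : 1 ≤ n) :
    (PySem.List.pyRange 0 (n : Int) 1).foldl (fun combos _layer =>
      if combos.length == 0 then
        (if u then [["+"], ["*"], ["||"]] else [["+"], ["*"]])
      else
        combos.foldl (fun new_combos combo =>
          if u then
            new_combos ++ [combo ++ ["+"]] ++ [combo ++ ["*"]] ++ [combo ++ ["||"]]
          else
            new_combos ++ [combo ++ ["+"]] ++ [combo ++ ["*"]]) []) []
      = altRec (altOps u) n := by
  induction n with
  | zero => omega
  | succ n ih =>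
    rcases Nat.lt_or_ge n 1 with h1 | h1
    · interval_cases n
      rw [show ((1 : Nat) : Int) = 0 + 1 by norm_num, PySem.List.pyRange_one_singleton]
      cases u <;> simp [altRec, altOps]
    · rw [show ((n + 1 : Nat) : Int) = (n : Int) + 1 by push_cast; ring,
        PySem.List.pyRange_one_succ_right (by positivity), List.foldl_append, ih h1]
      have hne : (altRec (altOps u) n).length ≠ 0 :=
        fun h => altRec_ne_nil u n (List.length_eq_zero_iff.mp h)
      simp only [List.foldl_cons, List.foldl_nil, beq_iff_eq, hne, if_false]
      rw [innerA, List.nil_append, extend_altRec]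

-- ===== VERDICT (by name: the statement is the Claim_ definition above) =====
theorem operCombos_spec : Claim_equal_operCombos := by
  intro n u _
  unfold Spec_operCombos operCombos operCombos_alt
  rcases le_or_gt (n - 1) 0 with h | h
  · rw [PySem.List.pyRange_one_eq_nil h]
    simp [h]
  · have h1 : 1 ≤ (n - 1).toNat := by omega
    have hc : ((n - 1).toNat : Int) = n - 1 := Int.toNat_of_nonneg (by omega)
    rw [if_neg (show ¬ n - 1 ≤ 0 by omega), ← hc, Int.toNat_natCast]
    exact loopA u _ h1
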